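-- pv_equiv track=rewrite | github.com/Beheroth/ABC2Tab | Converter.py | simplify_left
-- ===== SOURCE A (Python) =====
-- def simplify_left(pos):
--     ans = pos.copy()
--     i = 0
--     while (i < len(ans) - 1):
--         if (ans[i][0] == ans[i+1][0]):
--             ans.pop(i)
--         else:
--             i += 1
--     return ans
-- ===== SOURCE B (Python) =====
-- def simplify_left(pos):
--     result = []
--     for x in pos:
--         if result and result[-1][0] == x[0]:
--             result[-1] = x
--         else:
--             result.append(x)
--     return result
-- ===== Notes on version B (the rewrite author's own statement) =====
-- stated objective: simpler
-- what changed: Instead of repeatedly index-scanning and popping duplicates of a mutable copy in place, B builds a fresh list in one forward pass, overwriting the last retained element when first components match.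
import Mathlib
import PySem

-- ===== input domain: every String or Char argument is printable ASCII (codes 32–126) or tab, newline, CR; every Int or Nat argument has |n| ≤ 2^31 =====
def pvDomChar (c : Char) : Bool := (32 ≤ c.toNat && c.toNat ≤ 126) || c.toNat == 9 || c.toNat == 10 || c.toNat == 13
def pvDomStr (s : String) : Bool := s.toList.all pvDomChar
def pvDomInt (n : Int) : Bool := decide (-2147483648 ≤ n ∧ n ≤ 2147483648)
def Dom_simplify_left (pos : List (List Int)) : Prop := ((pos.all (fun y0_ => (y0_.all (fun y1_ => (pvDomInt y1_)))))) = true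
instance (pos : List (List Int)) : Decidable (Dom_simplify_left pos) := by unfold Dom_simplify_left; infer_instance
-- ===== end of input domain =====

-- B replaces A's in-place index-and-pop scan by a single forward pass that overwrites the
-- last retained element on a matching first component (objective: simpler; A mutates only its local copy).


-- ===== PORT A =====
-- while loop of A: i advances or an element is popped; [0] on an in-range index is getD 0 0
-- (Pre_ guarantees the inner lists compared are nonempty, so the default is never the value used).
def simplifyLeftGo (ans : List (List Int)) (i : Nat) : List (List Int) :=
  if _h : i + 1 < ans.length then
    if (ans.getD i []).getD 0 0 = (ans.getD (i+1) []).getD 0 0 then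
      simplifyLeftGo (ans.eraseIdx i) i
    else
      simplifyLeftGo ans (i+1)
  else ans
termination_by ans.length - i
decreasing_by
  · have hi : i < ans.length := by omega
    simp [List.length_eraseIdx, hi]; omega
  · omega

def simplify_left (pos : List (List Int)) : List (List Int) := simplifyLeftGo pos 0

-- ===== PORT B =====
def simplifyStepB (res : List (List Int)) (x : List Int) : List (List Int) :=
  match res.getLast? with
  | some l => if l.getD 0 0 = x.getD 0 0 then res.dropLast ++ [x] else res ++ [x]
  | none => res ++ [x]

def simplify_left_alt (pos : List (List Int)) : List (List Int) := pos.foldl simplifyStepB []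

-- ===== PRECONDITION & SPEC =====
-- Pre_ excludes inputs on which Python A raises IndexError: with at least two elements the loop
-- evaluates l[0] on every inner list, so an empty inner list raises (B raises there too).
def Pre_simplify_left (pos : List (List Int)) : Prop :=
  pos.length ≤ 1 ∨ ∀ l ∈ pos, l ≠ []
instance (pos : List (List Int)) : Decidable (Pre_simplify_left pos) := by
  unfold Pre_simplify_left; infer_instance

def pvWitness_simplify_left : List (List Int) := [[1, 2], [1, 3], [2]]

def Spec_simplify_left (pos : List (List Int)) (out : List (List Int)) : Prop := out = simplify_left_alt pos
instance (pos : List (List Int)) (out : List (List Int)) : Decidable (Spec_simplify_left pos out) := by unfold Spec_simplify_left; infer_instance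

-- ===== CLAIM (what is proved, stated in full; the proofs are below) =====
def Claim_equal_simplify_left : Prop := ∀ (pos : List (List Int)), Dom_simplify_left pos → Pre_simplify_left pos → Spec_simplify_left pos (simplify_left pos)

-- ===== LEMMAS AND PROOFS =====

-- reference function: keep the last element of each run of equal first components
def keepLast : List (List Int) → List (List Int)
  | [] => []
  | [a] => [a]
  | a :: b :: rest =>
      if a.getD 0 0 = b.getD 0 0 then keepLast (b :: rest) else a :: keepLast (b :: rest)

theorem simplifyLeftGo_eq (ans : List (List Int)) (i : Nat) :
    simplifyLeftGo ans i = ans.take i ++ keepLast (ans.drop i) := by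
  induction ans, i using simplifyLeftGo.induct with
  | case1 ans i h heq ih =>
      rw [simplifyLeftGo, dif_pos h, if_pos heq, ih]
      have hi : i < ans.length := by omega
      have hd1 : ans.drop i = ans[i] :: ans.drop (i+1) := List.drop_eq_getElem_cons hi
      have hd2 : ans.drop (i+1) = ans[i+1] :: ans.drop (i+2) := List.drop_eq_getElem_cons h
      have hlen : (ans.take i).length = i := List.length_take_of_le (le_of_lt hi)
      have hT : (ans.eraseIdx i).take i = ans.take i := by
        rw [List.eraseIdx_eq_take_drop_succ]; exact List.take_left' hlen
      have hD : (ans.eraseIdx i).drop i = ans.drop (i+1) := by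
        rw [List.eraseIdx_eq_take_drop_succ]; exact List.drop_left' hlen
      rw [List.getD_eq_getElem _ _ hi, List.getD_eq_getElem _ _ h] at heq
      rw [hT, hD, hd1, hd2, keepLast, if_pos heq, ← hd2]
  | case2 ans i h heq ih =>
      rw [simplifyLeftGo, dif_pos h, if_neg heq, ih]
      have hi : i < ans.length := by omega
      have hd1 : ans.drop i = ans[i] :: ans.drop (i+1) := List.drop_eq_getElem_cons hi
      have hd2 : ans.drop (i+1) = ans[i+1] :: ans.drop (i+2) := List.drop_eq_getElem_cons h
      have ht : ans.take (i+1) = ans.take i ++ [ans[i]] := List.take_succ_eq_append_getElem hi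
      rw [List.getD_eq_getElem _ _ hi, List.getD_eq_getElem _ _ h] at heq
      rw [ht, List.append_assoc, List.singleton_append, hd1, hd2, keepLast, if_neg heq, ← hd2]
  | case3 ans i h =>
      rw [simplifyLeftGo, dif_neg h]
      have : ans.length ≤ i + 1 := by omega
      rcases Nat.lt_or_ge i ans.length with hi | hi
      · have hdrop : ans.drop i = [ans[i]] := by
          rw [List.drop_eq_getElem_cons hi, List.drop_eq_nil_of_le (by omega)]
        have ht : ans.take (i+1) = ans.take i ++ [ans[i]] := List.take_succ_eq_append_getElem hi
        rw [hdrop, keepLast, ← ht, List.take_of_length_le (by omega)]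
      · rw [List.drop_eq_nil_of_le hi, List.take_of_length_le hi, keepLast, List.append_nil]

theorem foldB_eq (xs : List (List Int)) :
    ∀ (r : List (List Int)) (a : List Int),
      List.foldl simplifyStepB (r ++ [a]) xs = r ++ keepLast (a :: xs) := by
  induction xs with
  | nil => intro r a; simp [keepLast]
  | cons x xs ih =>
      intro r a
      rw [List.foldl_cons]
      have hstep : simplifyStepB (r ++ [a]) x =
          if a.getD 0 0 = x.getD 0 0 then r ++ [x] else (r ++ [a]) ++ [x] := by
        simp [simplifyStepB]
      rw [hstep]
      by_cases hc : a.getD 0 0 = x.getD 0 0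
      · rw [if_pos hc, ih, keepLast, if_pos hc]
      · rw [if_neg hc, ih (r ++ [a]) x, keepLast, if_neg hc, List.append_assoc,
          List.singleton_append]

theorem alt_eq_keepLast (pos : List (List Int)) : simplify_left_alt pos = keepLast pos := by
  cases pos with
  | nil => rfl
  | cons a xs =>
      show List.foldl simplifyStepB [] (a :: xs) = _
      rw [List.foldl_cons]
      have : simplifyStepB [] a = [] ++ [a] := by simp [simplifyStepB]
      rw [this, foldB_eq, List.nil_append]

-- ===== VERDICT (by name: the statement is the Claim_ definition above) =====
theorem simplify_left_spec : Claim_equal_simplify_left := by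
  intro pos _ _
  show simplify_left pos = simplify_left_alt pos
  rw [alt_eq_keepLast, simplify_left, simplifyLeftGo_eq, List.take_zero, List.drop_zero,
    List.nil_append]
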